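-- pv_equiv track=rewrite | github.com/Ravi-0412/DSA-Program-And-Notes | Graph/Shortest Path and Dijkastra/2812. Find the Safest Path in a Grid.py | _compute_thief_distances
-- ===== SOURCE A (Python) =====
-- from collections import deque
--
-- def _compute_thief_distances(grid: list[list[int]], n: int) -> list[list[int]]:
--     """
--     Uses Multi-source BFS to calculate the shortest distance from
--     each cell to any thief (represented by 1 in the grid).
--     """
--     dist = [[-1] * n for _ in range(n)]
--     queue = deque()
--
--     # Initialize queue with all thieves (distance 0).
--     for r in range(n):
--         for c in range(n):
--             if grid[r][c] == 1:
--                 dist[r][c] = 0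
--                 queue.append((r, c))
--
--     # 4-directional movement: Right, Left, Down, Up.
--     directions = [(0, 1), (0, -1), (1, 0), (-1, 0)]
--
--     while queue:
--         curr_r, curr_c = queue.popleft()
--
--         for dr, dc in directions:
--             nr, nc = curr_r + dr, curr_c + dc
--
--             # If neighbor is valid and hasn't been reached yet.
--             if 0 <= nr < n and 0 <= nc < n and dist[nr][nc] == -1:
--                 dist[nr][nc] = dist[curr_r][curr_c] + 1
--                 queue.append((nr, nc))
--
--     return dist
-- ===== SOURCE B (Python) =====
-- def _compute_thief_distances(grid: list[list[int]], n: int) -> list[list[int]]: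
--     """
--     Since the grid has no obstacles, the BFS distance from each cell to the
--     nearest thief is just the minimum Manhattan distance; compute it directly.
--     """
--     thieves = [(r, c) for r in range(n) for c in range(n) if grid[r][c] == 1]
--     return [[min((abs(r - tr) + abs(c - tc) for tr, tc in thieves), default=-1)
--              for c in range(n)] for r in range(n)]
-- ===== Notes on version B (the rewrite author's own statement) =====
-- stated objective: simpler
-- what changed: Replaces the multi-source BFS with a queue and visited matrix by a direct closed-form computation: each cell's value is the minimum Manhattan distance to any thief (-1 if there are none), since the BFS has no obstacles.
import Mathlib
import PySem

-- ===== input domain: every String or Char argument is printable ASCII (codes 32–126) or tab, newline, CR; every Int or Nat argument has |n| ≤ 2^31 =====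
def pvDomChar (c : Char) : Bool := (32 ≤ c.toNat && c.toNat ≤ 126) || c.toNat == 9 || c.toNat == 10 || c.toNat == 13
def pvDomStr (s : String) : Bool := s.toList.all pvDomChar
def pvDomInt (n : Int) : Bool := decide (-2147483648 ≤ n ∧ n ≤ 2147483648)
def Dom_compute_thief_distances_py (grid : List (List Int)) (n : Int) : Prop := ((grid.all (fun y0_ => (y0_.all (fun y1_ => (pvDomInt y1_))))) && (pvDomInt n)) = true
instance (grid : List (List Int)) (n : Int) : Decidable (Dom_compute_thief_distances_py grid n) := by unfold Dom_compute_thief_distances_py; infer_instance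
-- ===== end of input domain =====

-- B replaces the multi-source BFS by the closed form it computes on an obstacle-free grid:
-- each cell gets the minimum Manhattan distance to any thief, -1 if there is no thief (objective: simpler).

-- ===== PORT A =====
-- shared indexing helper: d[r][c] (indices are always ≥ 0 and in range on executed paths)
def get2 (d : List (List Int)) (r c : Int) : Int := (d.getD r.toNat []).getD c.toNat 0
-- dist[r][c] = v (in-place list mutation, functional)
def set2 (d : List (List Int)) (r c v : Int) : List (List Int) :=
  d.set r.toNat ((d.getD r.toNat []).set c.toNat v)

-- Python's `directions` list
def dirs : List (Int × Int) := [(0, 1), (0, -1), (1, 0), (-1, 0)]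

-- body of the `for dr, dc in directions` loop
def bfsStep (n r c : Int) (s : List (List Int) × List (Int × Int)) (d : Int × Int) :
    List (List Int) × List (Int × Int) :=
  let nr := r + d.1
  let nc := c + d.2
  if 0 ≤ nr ∧ nr < n ∧ 0 ≤ nc ∧ nc < n ∧ get2 s.1 nr nc = -1 then
    (set2 s.1 nr nc (get2 s.1 r c + 1), s.2 ++ [(nr, nc)])
  else s

-- the `while queue` loop; fuel only makes the recursion structural, the initial
-- fuel supplied below is proved sufficient so the `0, _ :: _` branch is never taken
def bfsLoop (n : Int) : Nat → List (List Int) → List (Int × Int) → List (List Int)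
  | _, dist, [] => dist
  | 0, dist, _ :: _ => dist
  | fuel + 1, dist, (r, c) :: q =>
      let s := dirs.foldl (bfsStep n r c) (dist, q)
      bfsLoop n fuel s.1 s.2

def compute_thief_distances_py (grid : List (List Int)) (n : Int) : List (List Int) :=
  let dist0 := (PySem.List.pyRange 0 n 1).map (fun _ => List.replicate n.toNat (-1 : Int))
  let init := (PySem.List.pyRange 0 n 1).foldl
    (fun s r => (PySem.List.pyRange 0 n 1).foldl
      (fun s c => if get2 grid r c = 1 then (set2 s.1 r c 0, s.2 ++ [(r, c)]) else s) s)
    (dist0, ([] : List (Int × Int)))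
  bfsLoop n (2 * n.toNat * n.toNat + init.2.length) init.1 init.2

-- ===== PORT B =====
-- thieves = [(r, c) for r in range(n) for c in range(n) if grid[r][c] == 1]
def thievesOf (grid : List (List Int)) (n : Int) : List (Int × Int) :=
  (PySem.List.pyRange 0 n 1).flatMap (fun r =>
    ((PySem.List.pyRange 0 n 1).filter (fun c => decide (get2 grid r c = 1))).map (fun c => (r, c)))

-- min((abs(r - tr) + abs(c - tc) for tr, tc in thieves), default=-1)
def mdOf (ts : List (Int × Int)) (r c : Int) : Int :=
  match ts with
  | [] => -1
  | t :: tss => tss.foldl (fun m t' => min m (|r - t'.1| + |c - t'.2|)) (|r - t.1| + |c - t.2|)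

def compute_thief_distances_py_alt (grid : List (List Int)) (n : Int) : List (List Int) :=
  let thieves := thievesOf grid n
  (PySem.List.pyRange 0 n 1).map (fun r =>
    (PySem.List.pyRange 0 n 1).map (fun c => mdOf thieves r c))

-- ===== PRECONDITION & SPEC =====
-- Pre_ excludes exactly the inputs where Python A raises IndexError: grid must have at
-- least n rows and each of the first n rows at least n columns.
def Pre_compute_thief_distances_py (grid : List (List Int)) (n : Int) : Prop :=
  n ≤ (grid.length : Int) ∧ ∀ row ∈ grid.take n.toNat, n ≤ (row.length : Int)
instance (grid : List (List Int)) (n : Int) : Decidable (Pre_compute_thief_distances_py grid n) := by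
  unfold Pre_compute_thief_distances_py; infer_instance

def pvWitness_compute_thief_distances_py : List (List Int) × Int := ([[1, 0], [0, 0]], 2)

def Spec_compute_thief_distances_py (grid : List (List Int)) (n : Int) (out : List (List Int)) : Prop := out = compute_thief_distances_py_alt grid n
instance (grid : List (List Int)) (n : Int) (out : List (List Int)) : Decidable (Spec_compute_thief_distances_py grid n out) := by unfold Spec_compute_thief_distances_py; infer_instance

-- ===== CLAIM (what is proved, stated in full; the proofs are below) =====
def Claim_equal_compute_thief_distances_py : Prop := ∀ (grid : List (List Int)) (n : Int), Dom_compute_thief_distances_py grid n → Pre_compute_thief_distances_py grid n → Spec_compute_thief_distances_py grid n (compute_thief_distances_py grid n)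

-- ===== LEMMAS AND PROOFS =====

-- ---------- generic foldl-min facts ----------

theorem foldl_min_le_init (l : List (Int × Int)) (f : Int × Int → Int) (a : Int) :
    l.foldl (fun m t => min m (f t)) a ≤ a := by
  induction l generalizing a with
  | nil => simp
  | cons x xs ih => exact le_trans (ih (min a (f x))) (min_le_left _ _)

theorem foldl_min_le_mem (l : List (Int × Int)) (f : Int × Int → Int) (a : Int)
    (x : Int × Int) (hx : x ∈ l) : l.foldl (fun m t => min m (f t)) a ≤ f x := by
  induction l generalizing a with
  | nil => simp at hx
  | cons y ys ih =>
    rcases List.mem_cons.1 hx with h | h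
    · subst h
      exact le_trans (foldl_min_le_init ys f (min a (f x))) (min_le_right _ _)
    · exact ih (min a (f y)) h

theorem foldl_min_cases (l : List (Int × Int)) (f : Int × Int → Int) (a : Int) :
    l.foldl (fun m t => min m (f t)) a = a ∨ ∃ x ∈ l, l.foldl (fun m t => min m (f t)) a = f x := by
  induction l generalizing a with
  | nil => left; rfl
  | cons y ys ih =>
    rcases ih (min a (f y)) with h | ⟨x, hx, h⟩
    · rcases min_cases a (f y) with ⟨h', _⟩ | ⟨h', _⟩
      · left; simpa [List.foldl, h'] using h
      · right; exact ⟨y, List.mem_cons_self, by simpa [List.foldl, h'] using h⟩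
    · right; exact ⟨x, List.mem_cons_of_mem _ hx, by simpa [List.foldl] using h⟩

-- ---------- mdOf (minimum Manhattan distance) facts ----------

theorem mdOf_le (ts : List (Int × Int)) (r c : Int) (t : Int × Int) (ht : t ∈ ts) :
    mdOf ts r c ≤ |r - t.1| + |c - t.2| := by
  cases ts with
  | nil => simp at ht
  | cons u us =>
    rcases List.mem_cons.1 ht with h | h
    · subst h; exact foldl_min_le_init us _ _
    · exact foldl_min_le_mem us _ _ t h

theorem mdOf_spec (ts : List (Int × Int)) (r c : Int) (h : ts ≠ []) :
    ∃ t ∈ ts, mdOf ts r c = |r - t.1| + |c - t.2| := by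
  cases ts with
  | nil => exact absurd rfl h
  | cons u us =>
    rcases foldl_min_cases us (fun t => |r - t.1| + |c - t.2|) (|r - u.1| + |c - u.2|) with h' | ⟨x, hx, h'⟩
    · exact ⟨u, List.mem_cons_self, h'⟩
    · exact ⟨x, List.mem_cons_of_mem _ hx, h'⟩

theorem mdOf_nonneg (ts : List (Int × Int)) (r c : Int) (h : ts ≠ []) :
    0 ≤ mdOf ts r c := by
  obtain ⟨t, _, ht⟩ := mdOf_spec ts r c h
  rw [ht]
  positivity

theorem mdOf_triangle (ts : List (Int × Int)) (r c r' c' : Int) (h : ts ≠ []) :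
    mdOf ts r c ≤ mdOf ts r' c' + (|r - r'| + |c - c'|) := by
  obtain ⟨t, htm, ht⟩ := mdOf_spec ts r' c' h
  have h1 : mdOf ts r c ≤ |r - t.1| + |c - t.2| := mdOf_le ts r c t htm
  have h2 : |r - t.1| ≤ |r - r'| + |r' - t.1| := abs_sub_le _ _ _
  have h3 : |c - t.2| ≤ |c - c'| + |c' - t.2| := abs_sub_le _ _ _
  omega

theorem mdOf_mem_zero (ts : List (Int × Int)) (r c : Int) (h : (r, c) ∈ ts) :
    mdOf ts r c = 0 := by
  have h1 : mdOf ts r c ≤ |r - (r, c).1| + |c - (r, c).2| := mdOf_le ts r c _ h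
  have h2 : 0 ≤ mdOf ts r c := mdOf_nonneg ts r c (by rintro rfl; simp at h)
  simp at h1
  omega

theorem mdOf_zero_mem (ts : List (Int × Int)) (r c : Int) (h : ts ≠ [])
    (h0 : mdOf ts r c = 0) : (r, c) ∈ ts := by
  obtain ⟨t, htm, ht⟩ := mdOf_spec ts r c h
  have h1 : 0 ≤ |r - t.1| := abs_nonneg _
  have h2 : 0 ≤ |c - t.2| := abs_nonneg _
  have h3 : |r - t.1| = 0 := by omega
  have h4 : |c - t.2| = 0 := by omega
  have h5 : r = t.1 := by have := abs_eq_zero.1 h3; omega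
  have h6 : c = t.2 := by have := abs_eq_zero.1 h4; omega
  rw [h5, h6]
  exact htm

theorem dirs_neg (d : Int × Int) (hd : d ∈ dirs) : (-d.1, -d.2) ∈ dirs := by
  simp only [dirs, List.mem_cons, List.not_mem_nil, or_false] at hd ⊢
  rcases hd with h | h | h | h <;> subst h <;> norm_num

theorem mdOf_adj (ts : List (Int × Int)) (r c : Int) (d : Int × Int) (hd : d ∈ dirs)
    (h : ts ≠ []) : mdOf ts (r + d.1) (c + d.2) ≤ mdOf ts r c + 1 := by
  have := mdOf_triangle ts (r + d.1) (c + d.2) r c h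
  simp only [dirs, List.mem_cons, List.not_mem_nil, or_false] at hd
  rcases hd with h' | h' | h' | h' <;> subst h' <;> simp_all

theorem step_toward (ts : List (Int × Int)) (n r c : Int)
    (hts : ∀ t ∈ ts, 0 ≤ t.1 ∧ t.1 < n ∧ 0 ≤ t.2 ∧ t.2 < n) (h : ts ≠ [])
    (hr : 0 ≤ r) (hrn : r < n) (hc : 0 ≤ c) (hcn : c < n) (hpos : 0 < mdOf ts r c) :
    ∃ d ∈ dirs, 0 ≤ r + d.1 ∧ r + d.1 < n ∧ 0 ≤ c + d.2 ∧ c + d.2 < n ∧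
      mdOf ts (r + d.1) (c + d.2) = mdOf ts r c - 1 := by
  obtain ⟨t, htm, ht⟩ := mdOf_spec ts r c h
  obtain ⟨ht1, ht2, ht3, ht4⟩ := hts t htm
  have key : ∀ d : Int × Int, d ∈ dirs → |r + d.1 - t.1| + |c + d.2 - t.2| = mdOf ts r c - 1 →
      mdOf ts (r + d.1) (c + d.2) = mdOf ts r c - 1 := by
    intro d hd hval
    have h1 : mdOf ts (r + d.1) (c + d.2) ≤ mdOf ts r c - 1 := hval ▸ mdOf_le ts _ _ t htm
    have h2 : mdOf ts r c ≤ mdOf ts (r + d.1) (c + d.2) + (|r - (r + d.1)| + |c - (c + d.2)|) :=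
      mdOf_triangle ts r c (r + d.1) (c + d.2) h
    simp only [dirs, List.mem_cons, List.not_mem_nil, or_false] at hd
    rcases hd with h' | h' | h' | h' <;> subst h' <;> simp_all <;> omega
  rcases lt_trichotomy r t.1 with hlt | heq | hgt
  · refine ⟨(1, 0), by simp [dirs], by omega, by omega, by omega, by omega, ?_⟩
    apply key _ (by simp [dirs])
    have e1 : |r - t.1| = t.1 - r := by rw [abs_of_nonpos (by omega)]; ring
    have e2 : |r + 1 - t.1| = t.1 - (r + 1) := by rw [abs_of_nonpos (by omega)]; ring
    simp only [add_zero, ht, e1, e2]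
    omega
  · rcases lt_trichotomy c t.2 with hlt' | heq' | hgt'
    · refine ⟨(0, 1), by simp [dirs], by omega, by omega, by omega, by omega, ?_⟩
      apply key _ (by simp [dirs])
      have e1 : |c - t.2| = t.2 - c := by rw [abs_of_nonpos (by omega)]; ring
      have e2 : |c + 1 - t.2| = t.2 - (c + 1) := by rw [abs_of_nonpos (by omega)]; ring
      simp only [add_zero, ht, e1, e2]
      omega
    · exfalso
      have : |r - t.1| = 0 := by rw [heq]; simp
      have : |c - t.2| = 0 := by rw [heq']; simp
      simp_all
    · refine ⟨(0, -1), by simp [dirs], by omega, by omega, by omega, by omega, ?_⟩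
      apply key _ (by simp [dirs])
      have e1 : |c - t.2| = c - t.2 := abs_of_nonneg (by omega)
      have e2 : |c + -1 - t.2| = c + -1 - t.2 := abs_of_nonneg (by omega)
      simp only [add_zero, ht, e1, e2]
      omega
  · refine ⟨(-1, 0), by simp [dirs], by omega, by omega, by omega, by omega, ?_⟩
    apply key _ (by simp [dirs])
    have e1 : |r - t.1| = r - t.1 := abs_of_nonneg (by omega)
    have e2 : |r + -1 - t.1| = r + -1 - t.1 := abs_of_nonneg (by omega)
    simp only [add_zero, ht, e1, e2]
    omega

theorem mem_thievesOf (grid : List (List Int)) (n : Int) (p : Int × Int) :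
    p ∈ thievesOf grid n ↔ 0 ≤ p.1 ∧ p.1 < n ∧ 0 ≤ p.2 ∧ p.2 < n ∧ get2 grid p.1 p.2 = 1 := by
  obtain ⟨a, b⟩ := p
  simp only [thievesOf, List.mem_flatMap, List.mem_map, List.mem_filter,
    PySem.List.mem_pyRange_one, decide_eq_true_eq, Prod.mk.injEq]
  constructor
  · rintro ⟨r, ⟨hr1, hr2⟩, c, ⟨⟨⟨hc1, hc2⟩, hg⟩, rfl, rfl⟩⟩
    exact ⟨hr1, hr2, hc1, hc2, hg⟩
  · rintro ⟨h1, h2, h3, h4, h5⟩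
    exact ⟨a, ⟨h1, h2⟩, b, ⟨⟨⟨h3, h4⟩, h5⟩, rfl, rfl⟩⟩


-- ---------- matrix (list of lists) facts ----------

def ShapeN (N : Nat) (D : List (List Int)) : Prop :=
  D.length = N ∧ ∀ row ∈ D, row.length = N

theorem get2_eq_getElem (D : List (List Int)) (r c : Int)
    (h1 : r.toNat < D.length) (h2 : c.toNat < (D[r.toNat]).length) :
    get2 D r c = D[r.toNat][c.toNat] := by
  unfold get2
  rw [List.getD_eq_getElem D [] h1, List.getD_eq_getElem _ _ h2]

theorem get2_natCast (D : List (List Int)) (i j : Nat)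
    (h1 : i < D.length) (h2 : j < (D[i]).length) :
    get2 D (i : Int) (j : Int) = D[i][j] := by
  unfold get2
  simp only [Int.toNat_natCast]
  rw [List.getD_eq_getElem D [] h1, List.getD_eq_getElem _ _ h2]

theorem shape_set2 (N : Nat) (D : List (List Int)) (r c v : Int) (hD : ShapeN N D) :
    ShapeN N (set2 D r c v) := by
  obtain ⟨hlen, hrow⟩ := hD
  by_cases hr : r.toNat < D.length
  · refine ⟨by simp [set2, hlen], ?_⟩
    intro row hmem
    unfold set2 at hmem
    rcases List.mem_or_eq_of_mem_set hmem with h | h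
    · exact hrow row h
    · subst h
      rw [List.length_set, List.getD_eq_getElem D [] hr]
      exact hrow _ (List.getElem_mem hr)
  · unfold set2
    rw [List.set_eq_of_length_le (by omega)]
    exact ⟨hlen, hrow⟩

theorem getD_set_eq_of_lt {α : Type} (l : List α) (j : Nat) (x d : α) (h : j < l.length) :
    (l.set j x).getD j d = x := by
  rw [List.getD_eq_getElem _ _ (by simpa using h), List.getElem_set_self (by simpa using h)]

theorem getD_set_ne_idx {α : Type} (l : List α) (i j : Nat) (x d : α) (h : i ≠ j) :
    (l.set j x).getD i d = l.getD i d := by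
  rw [List.getD_eq_getElem?_getD, List.getD_eq_getElem?_getD,
    List.getElem?_set_ne (by omega)]

theorem get2_set2_self (N : Nat) (D : List (List Int)) (r c v : Int) (hD : ShapeN N D)
    (hr : 0 ≤ r) (hrn : r < (N : Int)) (hc : 0 ≤ c) (hcn : c < (N : Int)) :
    get2 (set2 D r c v) r c = v := by
  obtain ⟨hlen, hrow⟩ := hD
  have hr' : r.toNat < D.length := by omega
  have hc' : c.toNat < (D[r.toNat]).length := by
    rw [hrow _ (List.getElem_mem hr')]; omega
  unfold get2 set2
  rw [getD_set_eq_of_lt _ _ _ _ hr', List.getD_eq_getElem D [] hr',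
    getD_set_eq_of_lt _ _ _ _ hc']

theorem get2_set2_ne (N : Nat) (D : List (List Int)) (r c v r' c' : Int) (_hD : ShapeN N D)
    (hr : 0 ≤ r) (hc : 0 ≤ c) (hr' : 0 ≤ r') (hc' : 0 ≤ c')
    (hne : (r', c') ≠ (r, c)) :
    get2 (set2 D r c v) r' c' = get2 D r' c' := by
  unfold get2 set2
  by_cases hrr : r'.toNat = r.toNat
  · have : r' = r := by omega
    subst this
    have hcc : c'.toNat ≠ c.toNat := by
      intro h
      exact hne (by rw [show c' = c by omega])
    by_cases hlt : r'.toNat < D.length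
    · rw [hrr, getD_set_eq_of_lt _ _ _ _ (by omega), getD_set_ne_idx _ _ _ _ _ hcc]
    · rw [List.set_eq_of_length_le (by omega)]
  · rw [getD_set_ne_idx _ _ _ _ _ hrr]

-- number of still-unvisited (= -1) in-range cells
def cntU (N : Nat) (D : List (List Int)) : Nat :=
  ((Finset.range N ×ˢ Finset.range N).filter
    (fun p => get2 D (p.1 : Int) (p.2 : Int) = -1)).card

theorem cntU_le (N : Nat) (D : List (List Int)) : cntU N D ≤ N * N := by
  calc ((Finset.range N ×ˢ Finset.range N).filter _).card
      ≤ (Finset.range N ×ˢ Finset.range N).card := Finset.card_filter_le _ _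
    _ = N * N := by simp

theorem cntU_set2 (N : Nat) (D : List (List Int)) (r c v : Int) (hD : ShapeN N D)
    (hr : 0 ≤ r) (hrn : r < (N : Int)) (hc : 0 ≤ c) (hcn : c < (N : Int))
    (hold : get2 D r c = -1) (hv : v ≠ -1) :
    cntU N (set2 D r c v) + 1 = cntU N D := by
  classical
  have hxmem : (r.toNat, c.toNat) ∈ Finset.range N ×ˢ Finset.range N := by
    simp only [Finset.mem_product, Finset.mem_range]
    omega
  have hne_of : ∀ p : Nat × Nat, p ≠ (r.toNat, c.toNat) →
      ((p.1 : Int), (p.2 : Int)) ≠ (r, c) := by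
    intro p hp h
    apply hp
    rw [Prod.mk.injEq] at h ⊢
    omega
  have hfilter : (Finset.range N ×ˢ Finset.range N).filter
      (fun p => get2 (set2 D r c v) (p.1 : Int) (p.2 : Int) = -1) =
      ((Finset.range N ×ˢ Finset.range N).filter
      (fun p => get2 D (p.1 : Int) (p.2 : Int) = -1)).erase (r.toNat, c.toNat) := by
    ext p
    simp only [Finset.mem_filter, Finset.mem_erase]
    constructor
    · rintro ⟨hp, hval⟩
      have hpx : p ≠ (r.toNat, c.toNat) := by
        rintro rfl
        simp only at hval
        rw [show ((r.toNat : Int)) = r by omega, show ((c.toNat : Int)) = c by omega,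
          get2_set2_self N D r c v hD hr hrn hc hcn] at hval
        exact hv hval
      rw [get2_set2_ne N D r c v _ _ hD hr hc (by positivity) (by positivity)
        (hne_of p hpx)] at hval
      exact ⟨hpx, hp, hval⟩
    · rintro ⟨hpx, hp, hval⟩
      refine ⟨hp, ?_⟩
      rw [get2_set2_ne N D r c v _ _ hD hr hc (by positivity) (by positivity) (hne_of p hpx)]
      exact hval
  have hxf : (r.toNat, c.toNat) ∈ (Finset.range N ×ˢ Finset.range N).filter
      (fun p => get2 D (p.1 : Int) (p.2 : Int) = -1) := by
    rw [Finset.mem_filter]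
    refine ⟨hxmem, ?_⟩
    simp only
    rw [show ((r.toNat : Int)) = r by omega, show ((c.toNat : Int)) = c by omega]
    exact hold
  unfold cntU
  rw [hfilter, Finset.card_erase_of_mem hxf]
  have := Finset.card_pos.2 ⟨(r.toNat, c.toNat), hxf⟩
  omega

theorem pairwise_const_le (l : List (Int × Int)) (f : Int × Int → Int) (v : Int)
    (h : ∀ x ∈ l, f x = v) : l.Pairwise (fun a b => f a ≤ f b) := by
  induction l with
  | nil => exact List.Pairwise.nil
  | cons x xs ih =>
    refine List.Pairwise.cons ?_ (ih fun y hy => h y (List.mem_cons_of_mem _ hy))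
    intro y hy
    rw [h x List.mem_cons_self, h y (List.mem_cons_of_mem _ hy)]


-- ---------- the BFS invariant ----------

structure BfsInv (grid : List (List Int)) (n : Int) (D : List (List Int))
    (Q : List (Int × Int)) : Prop where
  shape : ShapeN n.toNat D
  vals : ∀ r c : Int, 0 ≤ r → r < n → 0 ≤ c → c < n →
    get2 D r c = -1 ∨ get2 D r c = mdOf (thievesOf grid n) r c
  thief_vis : ∀ t ∈ thievesOf grid n, get2 D t.1 t.2 ≠ -1
  q_range : ∀ p ∈ Q, 0 ≤ p.1 ∧ p.1 < n ∧ 0 ≤ p.2 ∧ p.2 < n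
  q_vis : ∀ p ∈ Q, get2 D p.1 p.2 ≠ -1
  q_val : ∀ p ∈ Q, get2 D p.1 p.2 = mdOf (thievesOf grid n) p.1 p.2
  q_sorted : Q.Pairwise (fun a b =>
    mdOf (thievesOf grid n) a.1 a.2 ≤ mdOf (thievesOf grid n) b.1 b.2)
  q_spread : ∀ h ∈ Q.head?, ∀ p ∈ Q,
    mdOf (thievesOf grid n) p.1 p.2 ≤ mdOf (thievesOf grid n) h.1 h.2 + 1
  frontier : ∀ h ∈ Q.head?, ∀ r c : Int, 0 ≤ r → r < n → 0 ≤ c → c < n →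
    get2 D r c = -1 → mdOf (thievesOf grid n) h.1 h.2 < mdOf (thievesOf grid n) r c
  closed : ∀ r c : Int, 0 ≤ r → r < n → 0 ≤ c → c < n → get2 D r c ≠ -1 → (r, c) ∉ Q →
    ∀ d ∈ dirs, 0 ≤ r + d.1 → r + d.1 < n → 0 ≤ c + d.2 → c + d.2 < n →
      get2 D (r + d.1) (c + d.2) ≠ -1

theorem thievesOf_range (grid : List (List Int)) (n : Int) :
    ∀ t ∈ thievesOf grid n, 0 ≤ t.1 ∧ t.1 < n ∧ 0 ≤ t.2 ∧ t.2 < n := by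
  intro t ht
  obtain ⟨h1, h2, h3, h4, _⟩ := (mem_thievesOf grid n t).1 ht
  exact ⟨h1, h2, h3, h4⟩

theorem T_ne_of_mem (grid : List (List Int)) (n : Int) (D : List (List Int))
    (Q : List (Int × Int)) (hInv : BfsInv grid n D Q) (p : Int × Int) (hp : p ∈ Q) :
    thievesOf grid n ≠ [] := by
  intro hT
  have h1 := hInv.q_vis p hp
  have h2 := hInv.q_val p hp
  rw [hT] at h2
  simp only [mdOf] at h2
  exact h1 h2

-- state of the matrix/queue while the four directions of a popped cell (r, c) are processed
def Mid (grid : List (List Int)) (n r c : Int) (D : List (List Int)) (q : List (Int × Int))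
    (s : List (List Int) × List (Int × Int)) (A : List (Int × Int)) : Prop :=
  s.2 = q ++ A ∧
  (∀ a ∈ A, (∃ d ∈ dirs, a = (r + d.1, c + d.2)) ∧
    0 ≤ a.1 ∧ a.1 < n ∧ 0 ≤ a.2 ∧ a.2 < n ∧ get2 D a.1 a.2 = -1) ∧
  (∀ r' c' : Int, 0 ≤ r' → 0 ≤ c' →
    get2 s.1 r' c' = if (r', c') ∈ A then mdOf (thievesOf grid n) r c + 1 else get2 D r' c') ∧
  ShapeN n.toNat s.1 ∧
  cntU n.toNat s.1 + A.length = cntU n.toNat D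

theorem bfsStep_mid (grid : List (List Int)) (n r c : Int) (D : List (List Int))
    (q : List (Int × Int)) (s : List (List Int) × List (Int × Int)) (A : List (Int × Int))
    (d : Int × Int) (hInv : BfsInv grid n D ((r, c) :: q)) (hM : Mid grid n r c D q s A)
    (hd : d ∈ dirs) :
    ∃ A', Mid grid n r c D q (bfsStep n r c s d) A' ∧
      (A' = A ∨ A' = A ++ [(r + d.1, c + d.2)]) ∧
      (0 ≤ r + d.1 → r + d.1 < n → 0 ≤ c + d.2 → c + d.2 < n →
        ((r + d.1, c + d.2) ∈ A' ∨ get2 D (r + d.1) (c + d.2) ≠ -1)) := by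
  obtain ⟨hs2, hA, hval, hshape, hcnt⟩ := hM
  have hT : thievesOf grid n ≠ [] :=
    T_ne_of_mem grid n D _ hInv (r, c) List.mem_cons_self
  have hv0 : 0 ≤ mdOf (thievesOf grid n) r c := mdOf_nonneg _ _ _ hT
  obtain ⟨hr0, hrn, hc0, hcn⟩ := hInv.q_range (r, c) List.mem_cons_self
  have hDrc : get2 D r c = mdOf (thievesOf grid n) r c :=
    hInv.q_val (r, c) List.mem_cons_self
  unfold bfsStep
  by_cases hg : 0 ≤ r + d.1 ∧ r + d.1 < n ∧ 0 ≤ c + d.2 ∧ c + d.2 < n ∧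
      get2 s.1 (r + d.1) (c + d.2) = -1
  · rw [if_pos hg]
    obtain ⟨h1, h2, h3, h4, h5⟩ := hg
    have hnotinA : (r + d.1, c + d.2) ∉ A := by
      intro hmem
      rw [hval _ _ h1 h3, if_pos hmem] at h5
      omega
    have hD5 : get2 D (r + d.1) (c + d.2) = -1 := by
      rw [hval _ _ h1 h3, if_neg hnotinA] at h5
      exact h5
    have hrcA : (r, c) ∉ A := by
      intro hmem
      obtain ⟨⟨d', hd', he⟩, _⟩ := hA _ hmem
      rw [Prod.mk.injEq] at he
      simp only [dirs, List.mem_cons, List.not_mem_nil, or_false] at hd'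
      rcases hd' with h | h | h | h <;> subst h <;> omega
    have hsrc : get2 s.1 r c = mdOf (thievesOf grid n) r c := by
      rw [hval r c hr0 hc0, if_neg hrcA, hDrc]
    refine ⟨A ++ [(r + d.1, c + d.2)], ⟨?_, ?_, ?_, ?_, ?_⟩, Or.inr rfl,
      fun _ _ _ _ => Or.inl (by simp)⟩
    · simpa [hs2] using (List.append_assoc q A [(r + d.1, c + d.2)]).symm
    · intro a ha
      rcases List.mem_append.1 ha with h | h
      · exact hA a h
      · have : a = (r + d.1, c + d.2) := by simpa using h
        subst this
        exact ⟨⟨d, hd, rfl⟩, h1, h2, h3, h4, hD5⟩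
    · intro r' c' hr' hc'
      simp only [hsrc]
      by_cases heq : (r', c') = (r + d.1, c + d.2)
      · rw [Prod.mk.injEq] at heq
        obtain ⟨rfl, rfl⟩ := heq
        rw [get2_set2_self n.toNat s.1 _ _ _ hshape h1 (by omega) h3 (by omega)]
        rw [if_pos (by simp)]
      · rw [get2_set2_ne n.toNat s.1 _ _ _ _ _ hshape h1 h3 hr' hc' heq]
        rw [hval r' c' hr' hc']
        by_cases hmem : (r', c') ∈ A
        · rw [if_pos hmem, if_pos (List.mem_append.2 (Or.inl hmem))]
        · rw [if_neg hmem, if_neg (by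
            intro hx
            rcases List.mem_append.1 hx with h | h
            · exact hmem h
            · exact heq (by simpa using h))]
    · exact shape_set2 _ _ _ _ _ hshape
    · simp only [hsrc]
      rw [List.length_append, List.length_singleton]
      have := cntU_set2 n.toNat s.1 (r + d.1) (c + d.2)
        (mdOf (thievesOf grid n) r c + 1) hshape h1 (by omega) h3 (by omega) h5 (by omega)
      omega
  · rw [if_neg hg]
    refine ⟨A, ⟨hs2, hA, hval, hshape, hcnt⟩, Or.inl rfl, ?_⟩
    intro h1 h2 h3 h4
    have h5 : get2 s.1 (r + d.1) (c + d.2) ≠ -1 := fun h5 => hg ⟨h1, h2, h3, h4, h5⟩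
    rw [hval _ _ h1 h3] at h5
    by_cases hmem : (r + d.1, c + d.2) ∈ A
    · exact Or.inl hmem
    · rw [if_neg hmem] at h5
      exact Or.inr h5

theorem bfsFold_mid (grid : List (List Int)) (n r c : Int) (D : List (List Int))
    (q : List (Int × Int)) (hInv : BfsInv grid n D ((r, c) :: q)) :
    ∃ A, Mid grid n r c D q (dirs.foldl (bfsStep n r c) (D, q)) A ∧
      ∀ d ∈ dirs, 0 ≤ r + d.1 → r + d.1 < n → 0 ≤ c + d.2 → c + d.2 < n →
        ((r + d.1, c + d.2) ∈ A ∨ get2 D (r + d.1) (c + d.2) ≠ -1) := by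
  have hM0 : Mid grid n r c D q (D, q) [] :=
    ⟨by simp, by simp, fun r' c' _ _ => by simp, hInv.shape, by simp⟩
  obtain ⟨A1, hM1, hsub1, hnb1⟩ :=
    bfsStep_mid grid n r c D q (D, q) [] (0, 1) hInv hM0 (by simp [dirs])
  obtain ⟨A2, hM2, hsub2, hnb2⟩ :=
    bfsStep_mid grid n r c D q _ A1 (0, -1) hInv hM1 (by simp [dirs])
  obtain ⟨A3, hM3, hsub3, hnb3⟩ :=
    bfsStep_mid grid n r c D q _ A2 (1, 0) hInv hM2 (by simp [dirs])
  obtain ⟨A4, hM4, hsub4, hnb4⟩ :=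
    bfsStep_mid grid n r c D q _ A3 (-1, 0) hInv hM3 (by simp [dirs])
  have hfold : dirs.foldl (bfsStep n r c) (D, q) =
      bfsStep n r c (bfsStep n r c (bfsStep n r c (bfsStep n r c (D, q) (0, 1)) (0, -1))
        (1, 0)) (-1, 0) := rfl
  have hs12 : A1 ⊆ A2 := by rcases hsub2 with h | h <;> simp [h]
  have hs23 : A2 ⊆ A3 := by rcases hsub3 with h | h <;> simp [h]
  have hs34 : A3 ⊆ A4 := by rcases hsub4 with h | h <;> simp [h]
  have hs14 : A1 ⊆ A4 := fun x hx => hs34 (hs23 (hs12 hx))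
  have hs24 : A2 ⊆ A4 := fun x hx => hs34 (hs23 hx)
  refine ⟨A4, by rw [hfold]; exact hM4, ?_⟩
  intro d hd h1 h2 h3 h4
  simp only [dirs, List.mem_cons, List.not_mem_nil, or_false] at hd
  rcases hd with h | h | h | h <;> subst h
  · rcases hnb1 h1 h2 h3 h4 with h' | h'
    · exact Or.inl (hs14 h')
    · exact Or.inr h'
  · rcases hnb2 h1 h2 h3 h4 with h' | h'
    · exact Or.inl (hs24 h')
    · exact Or.inr h'
  · rcases hnb3 h1 h2 h3 h4 with h' | h'
    · exact Or.inl (hs34 h')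
    · exact Or.inr h'
  · rcases hnb4 h1 h2 h3 h4 with h' | h'
    · exact Or.inl h'
    · exact Or.inr h'


theorem step_BfsInv (grid : List (List Int)) (n r c : Int) (D : List (List Int))
    (q : List (Int × Int)) (hInv : BfsInv grid n D ((r, c) :: q)) :
    BfsInv grid n (dirs.foldl (bfsStep n r c) (D, q)).1 (dirs.foldl (bfsStep n r c) (D, q)).2 ∧
    2 * cntU n.toNat (dirs.foldl (bfsStep n r c) (D, q)).1 +
      (dirs.foldl (bfsStep n r c) (D, q)).2.length + 1 ≤
      2 * cntU n.toNat D + ((r, c) :: q).length := by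
  obtain ⟨A, hM, hnb⟩ := bfsFold_mid grid n r c D q hInv
  obtain ⟨hs2, hA, hval, hshape, hcnt⟩ := hM
  set s := dirs.foldl (bfsStep n r c) (D, q) with hs
  have hT : thievesOf grid n ≠ [] := T_ne_of_mem grid n D _ hInv (r, c) List.mem_cons_self
  have hv0 : 0 ≤ mdOf (thievesOf grid n) r c := mdOf_nonneg _ _ _ hT
  obtain ⟨hr0, hrn, hc0, hcn⟩ := hInv.q_range (r, c) List.mem_cons_self
  have hfr := hInv.frontier (r, c) (by simp)
  simp only at hfr
  have hmdA : ∀ a ∈ A, mdOf (thievesOf grid n) a.1 a.2 = mdOf (thievesOf grid n) r c + 1 := by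
    intro a ha
    obtain ⟨⟨d, hd, he⟩, g1, g2, g3, g4, g5⟩ := hA a ha
    have hub : mdOf (thievesOf grid n) a.1 a.2 ≤ mdOf (thievesOf grid n) r c + 1 := by
      rw [he]
      exact mdOf_adj (thievesOf grid n) r c d hd hT
    have hlb : mdOf (thievesOf grid n) r c < mdOf (thievesOf grid n) a.1 a.2 := hfr a.1 a.2 g1 g2 g3 g4 g5
    omega
  have hvalA : ∀ a ∈ A, get2 s.1 a.1 a.2 = mdOf (thievesOf grid n) r c + 1 := by
    intro a ha
    obtain ⟨_, g1, _, g3, _, _⟩ := hA a ha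
    rw [hval a.1 a.2 g1 g3, if_pos (by simpa using ha)]
  have hval_notA : ∀ r' c' : Int, 0 ≤ r' → 0 ≤ c' → (r', c') ∉ A →
      get2 s.1 r' c' = get2 D r' c' := by
    intro r' c' h1 h2 h3
    rw [hval r' c' h1 h2, if_neg h3]
  have hnb' : ∀ d ∈ dirs, 0 ≤ r + d.1 → r + d.1 < n → 0 ≤ c + d.2 → c + d.2 < n →
      get2 s.1 (r + d.1) (c + d.2) ≠ -1 := by
    intro d hd h1 h2 h3 h4
    rw [hval _ _ h1 h3]
    rcases hnb d hd h1 h2 h3 h4 with h | h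
    · rw [if_pos h]; omega
    · by_cases hm : (r + d.1, c + d.2) ∈ A
      · rw [if_pos hm]; omega
      · rw [if_neg hm]; exact h
  have hkey : (∀ p ∈ q, mdOf (thievesOf grid n) p.1 p.2 ≠ mdOf (thievesOf grid n) r c) →
      ∀ x1 x2 : Int, 0 ≤ x1 → x1 < n → 0 ≤ x2 → x2 < n →
      get2 s.1 x1 x2 = -1 → mdOf (thievesOf grid n) x1 x2 ≠ mdOf (thievesOf grid n) r c + 1 := by
    intro hq0 x1 x2 g1 g2 g3 g4 hx heq
    have hxA : (x1, x2) ∉ A := by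
      intro hm
      have := hvalA (x1, x2) hm
      simp only at this
      omega
    have hDx : get2 D x1 x2 = -1 := by rw [← hval_notA x1 x2 g1 g3 hxA]; exact hx
    obtain ⟨d, hd, g1', g2', g3', g4', hy⟩ :=
      step_toward (thievesOf grid n) n x1 x2 (thievesOf_range grid n) hT g1 g2 g3 g4 (by omega)
    rw [heq] at hy
    have hyvis : get2 D (x1 + d.1) (x2 + d.2) ≠ -1 := by
      intro hc'
      have := hfr (x1 + d.1) (x2 + d.2) g1' g2' g3' g4' hc'
      omega
    by_cases hyrc : (x1 + d.1, x2 + d.2) = (r, c)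
    · rw [Prod.mk.injEq] at hyrc
      have e1 : x1 = r + -d.1 := by omega
      have e2 : x2 = c + -d.2 := by omega
      have := hnb' (-d.1, -d.2) (dirs_neg d hd) (by simp; omega) (by simp; omega)
        (by simp; omega) (by simp; omega)
      simp only at this
      rw [← e1, ← e2] at this
      exact this hx
    · by_cases hyq : (x1 + d.1, x2 + d.2) ∈ q
      · have := hq0 _ hyq
        simp only at this
        omega
      · have hnotin : (x1 + d.1, x2 + d.2) ∉ (r, c) :: q := by
          simp only [List.mem_cons]
          rintro (h | h)
          · exact hyrc h
          · exact hyq h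
        have := hInv.closed (x1 + d.1) (x2 + d.2) g1' g2' g3' g4' hyvis hnotin
          (-d.1, -d.2) (dirs_neg d hd) (by simp; omega) (by simp; omega)
          (by simp; omega) (by simp; omega)
        simp only at this
        rw [show x1 + d.1 + -d.1 = x1 by ring, show x2 + d.2 + -d.2 = x2 by ring] at this
        exact this hDx
  constructor
  · constructor
    · exact hshape
    · -- vals
      intro x1 x2 g1 g2 g3 g4
      rw [hval x1 x2 g1 g3]
      by_cases hm : (x1, x2) ∈ A
      · rw [if_pos hm]
        right
        have := hmdA (x1, x2) hm
        simp only at this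
        omega
      · rw [if_neg hm]
        exact hInv.vals x1 x2 g1 g2 g3 g4
    · -- thief_vis
      intro t ht
      obtain ⟨g1, _, g3, _⟩ := thievesOf_range grid n t ht
      rw [hval t.1 t.2 g1 g3]
      by_cases hm : (t.1, t.2) ∈ A
      · rw [if_pos hm]; omega
      · rw [if_neg hm]; exact hInv.thief_vis t ht
    · -- q_range
      intro p hp
      rw [hs2] at hp
      rcases List.mem_append.1 hp with h | h
      · exact hInv.q_range p (List.mem_cons_of_mem _ h)
      · obtain ⟨_, g1, g2, g3, g4, _⟩ := hA p h
        exact ⟨g1, g2, g3, g4⟩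
    · -- q_vis
      intro p hp
      rw [hs2] at hp
      rcases List.mem_append.1 hp with h | h
      · by_cases hm : p ∈ A
        · have := hvalA p hm; omega
        · rw [hval_notA p.1 p.2 (hInv.q_range p (List.mem_cons_of_mem _ h)).1
            (hInv.q_range p (List.mem_cons_of_mem _ h)).2.2.1 (by simpa using hm)]
          exact hInv.q_vis p (List.mem_cons_of_mem _ h)
      · have := hvalA p h; omega
    · -- q_val
      intro p hp
      rw [hs2] at hp
      rcases List.mem_append.1 hp with h | h
      · by_cases hm : p ∈ A
        · rw [hvalA p hm, hmdA p hm]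
        · rw [hval_notA p.1 p.2 (hInv.q_range p (List.mem_cons_of_mem _ h)).1
            (hInv.q_range p (List.mem_cons_of_mem _ h)).2.2.1 (by simpa using hm)]
          exact hInv.q_val p (List.mem_cons_of_mem _ h)
      · rw [hvalA p h, hmdA p h]
    · -- q_sorted
      rw [hs2, List.pairwise_append]
      refine ⟨(List.pairwise_cons.1 hInv.q_sorted).2, ?_, ?_⟩
      · exact pairwise_const_le A _ (mdOf (thievesOf grid n) r c + 1) hmdA
      · intro a ha b hb
        rw [hmdA b hb]
        have := hInv.q_spread (r, c) (by simp) a (List.mem_cons_of_mem _ ha)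
        simp only at this
        omega
    · -- q_spread
      intro h hh p hp
      rw [hs2] at hh hp
      cases q with
      | nil =>
        simp only [List.nil_append] at hh hp
        cases A with
        | nil => simp at hh
        | cons a A' =>
          have : h = a := by simpa using hh.symm
          subst this
          rw [hmdA p hp, hmdA h List.mem_cons_self]
          omega
      | cons p0 q' =>
        have : h = p0 := by simpa using hh.symm
        subst this
        have hp0 : mdOf (thievesOf grid n) r c ≤ mdOf (thievesOf grid n) h.1 h.2 :=
          (List.pairwise_cons.1 hInv.q_sorted).1 h List.mem_cons_self
        rcases List.mem_append.1 hp with hq | hA'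
        · have := hInv.q_spread (r, c) (by simp) p (List.mem_cons_of_mem _ hq)
          simp only at this
          omega
        · rw [hmdA p hA']
          omega
    · -- frontier
      intro h hh x1 x2 g1 g2 g3 g4 hx
      have hxA : (x1, x2) ∉ A := by
        intro hm
        have := hvalA (x1, x2) hm
        simp only at this
        omega
      have hDx : get2 D x1 x2 = -1 := by rw [← hval_notA x1 x2 g1 g3 hxA]; exact hx
      have hbase : mdOf (thievesOf grid n) r c < mdOf (thievesOf grid n) x1 x2 := hfr x1 x2 g1 g2 g3 g4 hDx
      rw [hs2] at hh
      cases q with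
      | nil =>
        simp only [List.nil_append] at hh
        have hhA : h ∈ A := List.mem_of_mem_head? hh
        rw [hmdA h hhA]
        have := hkey (by simp) x1 x2 g1 g2 g3 g4 hx
        omega
      | cons p0 q' =>
        have : h = p0 := by simpa using hh.symm
        subst this
        have hub := hInv.q_spread (r, c) (by simp) h (List.mem_cons_of_mem _ List.mem_cons_self)
        simp only at hub
        have hlb : mdOf (thievesOf grid n) r c ≤ mdOf (thievesOf grid n) h.1 h.2 :=
          (List.pairwise_cons.1 hInv.q_sorted).1 h List.mem_cons_self
        by_cases hcase : mdOf (thievesOf grid n) h.1 h.2 = mdOf (thievesOf grid n) r c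
        · omega
        · have hq0 : ∀ p ∈ (h :: q' : List (Int × Int)), mdOf (thievesOf grid n) p.1 p.2 ≠ mdOf (thievesOf grid n) r c := by
            intro p hp
            rcases List.mem_cons.1 hp with rfl | hp'
            · omega
            · have := (List.pairwise_cons.1 ((List.pairwise_cons.1 hInv.q_sorted).2)).1 p hp'
              omega
          have := hkey hq0 x1 x2 g1 g2 g3 g4 hx
          omega
    · -- closed
      intro x1 x2 g1 g2 g3 g4 hvis hnotin d hd k1 k2 k3 k4
      have hxA : (x1, x2) ∉ A := by
        intro hm
        apply hnotin
        rw [hs2]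
        exact List.mem_append.2 (Or.inr hm)
      by_cases hxrc : (x1, x2) = (r, c)
      · rw [Prod.mk.injEq] at hxrc
        obtain ⟨rfl, rfl⟩ := hxrc
        exact hnb' d hd k1 k2 k3 k4
      · have hDvis : get2 D x1 x2 ≠ -1 := by
          rw [← hval_notA x1 x2 g1 g3 hxA]
          exact hvis
        have hnotin' : (x1, x2) ∉ (r, c) :: q := by
          simp only [List.mem_cons]
          rintro (h | h)
          · exact hxrc h
          · exact hnotin (hs2 ▸ List.mem_append.2 (Or.inl h))
        have := hInv.closed x1 x2 g1 g2 g3 g4 hDvis hnotin' d hd k1 k2 k3 k4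
        rw [hval _ _ k1 k3]
        by_cases hm : (x1 + d.1, x2 + d.2) ∈ A
        · rw [if_pos hm]; omega
        · rw [if_neg hm]; exact this
  · -- measure
    have : s.2.length = q.length + A.length := by rw [hs2, List.length_append]
    simp only [List.length_cons]
    omega

theorem done_all (grid : List (List Int)) (n : Int) (D : List (List Int))
    (hInv : BfsInv grid n D []) :
    ∀ r c : Int, 0 ≤ r → r < n → 0 ≤ c → c < n →
      get2 D r c = mdOf (thievesOf grid n) r c := by
  intro r c h1 h2 h3 h4
  by_cases hT : thievesOf grid n = []
  · rcases hInv.vals r c h1 h2 h3 h4 with h | h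
    · rw [h, hT]; rfl
    · exact h
  · have hvis : ∀ k : Nat, ∀ r c : Int, 0 ≤ r → r < n → 0 ≤ c → c < n →
        (mdOf (thievesOf grid n) r c).toNat = k → get2 D r c ≠ -1 := by
      intro k
      induction k using Nat.strong_induction_on with
      | _ k ih =>
        intro r c h1 h2 h3 h4 hk
        by_cases h0 : mdOf (thievesOf grid n) r c = 0
        · exact hInv.thief_vis (r, c) (mdOf_zero_mem _ _ _ hT h0)
        · have hpos : 0 < mdOf (thievesOf grid n) r c :=
            lt_of_le_of_ne (mdOf_nonneg _ _ _ hT) (Ne.symm h0)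
          obtain ⟨d, hd, g1, g2, g3, g4, hy⟩ :=
            step_toward _ n r c (thievesOf_range grid n) hT h1 h2 h3 h4 hpos
          have hyvis : get2 D (r + d.1) (c + d.2) ≠ -1 := by
            apply ih (mdOf (thievesOf grid n) (r + d.1) (c + d.2)).toNat
              (by omega) _ _ g1 g2 g3 g4 rfl
          have := hInv.closed (r + d.1) (c + d.2) g1 g2 g3 g4 hyvis (by simp)
            (-d.1, -d.2) (dirs_neg d hd) (by simp; omega) (by simp; omega)
            (by simp; omega) (by simp; omega)
          simp only at this
          rw [show r + d.1 + -d.1 = r by ring, show c + d.2 + -d.2 = c by ring] at this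
          exact this
    rcases hInv.vals r c h1 h2 h3 h4 with h | h
    · exact absurd h (hvis _ r c h1 h2 h3 h4 rfl)
    · exact h

theorem bfsLoop_done (grid : List (List Int)) (n : Int) :
    ∀ (fuel : Nat) (D : List (List Int)) (Q : List (Int × Int)), BfsInv grid n D Q →
    2 * cntU n.toNat D + Q.length ≤ fuel →
    ShapeN n.toNat (bfsLoop n fuel D Q) ∧
    ∀ r c : Int, 0 ≤ r → r < n → 0 ≤ c → c < n →
      get2 (bfsLoop n fuel D Q) r c = mdOf (thievesOf grid n) r c := by
  intro fuel
  induction fuel with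
  | zero =>
    intro D Q hInv hb
    have hQ : Q = [] := by
      cases Q with
      | nil => rfl
      | cons p q => simp at hb
    subst hQ
    exact ⟨hInv.shape, done_all grid n D hInv⟩
  | succ f ih =>
    intro D Q hInv hb
    cases Q with
    | nil => exact ⟨hInv.shape, done_all grid n D hInv⟩
    | cons p q =>
      obtain ⟨r, c⟩ := p
      have hstep := step_BfsInv grid n r c D q hInv
      have heq : bfsLoop n (f + 1) D ((r, c) :: q) =
          bfsLoop n f (dirs.foldl (bfsStep n r c) (D, q)).1
            (dirs.foldl (bfsStep n r c) (D, q)).2 := rfl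
      rw [heq]
      exact ih _ _ hstep.1 (by omega)


-- ---------- initialization ----------

def allCells (n : Int) : List (Int × Int) :=
  (PySem.List.pyRange 0 n 1).flatMap (fun r => (PySem.List.pyRange 0 n 1).map (fun c => (r, c)))

def initF (grid : List (List Int)) (s : List (List Int) × List (Int × Int)) (p : Int × Int) :
    List (List Int) × List (Int × Int) :=
  if get2 grid p.1 p.2 = 1 then (set2 s.1 p.1 p.2 0, s.2 ++ [p]) else s

def dist0Of (n : Int) : List (List Int) :=
  (PySem.List.pyRange 0 n 1).map (fun _ => List.replicate n.toNat (-1 : Int))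

theorem mem_allCells (n : Int) (p : Int × Int) :
    p ∈ allCells n ↔ 0 ≤ p.1 ∧ p.1 < n ∧ 0 ≤ p.2 ∧ p.2 < n := by
  obtain ⟨a, b⟩ := p
  simp only [allCells, List.mem_flatMap, List.mem_map, PySem.List.mem_pyRange_one,
    Prod.mk.injEq]
  constructor
  · rintro ⟨r, ⟨h1, h2⟩, c, ⟨h3, h4⟩, rfl, rfl⟩
    exact ⟨h1, h2, h3, h4⟩
  · rintro ⟨h1, h2, h3, h4⟩
    exact ⟨a, ⟨h1, h2⟩, b, ⟨h3, h4⟩, rfl, rfl⟩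

theorem init_eq_allCells (grid : List (List Int)) (n : Int) :
    (PySem.List.pyRange 0 n 1).foldl
      (fun s r => (PySem.List.pyRange 0 n 1).foldl
        (fun s c => if get2 grid r c = 1 then (set2 s.1 r c 0, s.2 ++ [(r, c)]) else s) s)
      (dist0Of n, ([] : List (Int × Int))) =
    (allCells n).foldl (initF grid) (dist0Of n, ([] : List (Int × Int))) := by
  rw [allCells, List.foldl_flatMap]
  congr 1
  funext s r
  rw [List.foldl_map]
  rfl

theorem initF_snd (grid : List (List Int)) (l : List (Int × Int)) :
    ∀ s0 : List (List Int) × List (Int × Int),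
      (l.foldl (initF grid) s0).2 =
        s0.2 ++ l.filter (fun p => decide (get2 grid p.1 p.2 = 1)) := by
  induction l with
  | nil => intro s0; simp
  | cons p l ih =>
    intro s0
    by_cases h : get2 grid p.1 p.2 = 1
    · simp [initF, h, ih]
    · simp [initF, h, ih]

theorem initF_fst (grid : List (List Int)) (n : Int)
    (s0 : List (List Int) × List (Int × Int)) (hs0 : ShapeN n.toNat s0.1) :
    ∀ l : List (Int × Int), (∀ p ∈ l, 0 ≤ p.1 ∧ p.1 < n ∧ 0 ≤ p.2 ∧ p.2 < n) →
      ShapeN n.toNat ((l.foldl (initF grid) s0).1) ∧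
      ∀ r c : Int, 0 ≤ r → 0 ≤ c →
        get2 (l.foldl (initF grid) s0).1 r c =
          if (r, c) ∈ l ∧ get2 grid r c = 1 then 0 else get2 s0.1 r c := by
  intro l
  induction l using List.reverseRecOn with
  | nil =>
    intro _
    refine ⟨hs0, fun r c _ _ => ?_⟩
    simp
  | append_singleton l p ih =>
    intro hl
    have hl' : ∀ p ∈ l, 0 ≤ p.1 ∧ p.1 < n ∧ 0 ≤ p.2 ∧ p.2 < n :=
      fun x hx => hl x (List.mem_append.2 (Or.inl hx))
    obtain ⟨hp1, hp2, hp3, hp4⟩ := hl p (List.mem_append.2 (Or.inr (by simp)))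
    obtain ⟨ihS, ihV⟩ := ih hl'
    rw [List.foldl_append]
    simp only [List.foldl_cons, List.foldl_nil]
    by_cases hP : get2 grid p.1 p.2 = 1
    · constructor
      · rw [initF, if_pos hP]
        exact shape_set2 _ _ _ _ _ ihS
      · intro r c hr hc
        rw [initF, if_pos hP]
        by_cases heq : (r, c) = (p.1, p.2)
        · rw [Prod.mk.injEq] at heq
          obtain ⟨rfl, rfl⟩ := heq
          rw [get2_set2_self n.toNat _ _ _ _ ihS hp1 (by omega) hp3 (by omega)]
          rw [if_pos ⟨List.mem_append.2 (Or.inr (by simp)), hP⟩]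
        · rw [get2_set2_ne n.toNat _ _ _ _ _ _ ihS hp1 hp3 hr hc heq]
          rw [ihV r c hr hc]
          have hmem : ((r, c) ∈ l ++ [p] ∧ get2 grid r c = 1) ↔
              ((r, c) ∈ l ∧ get2 grid r c = 1) := by
            constructor
            · rintro ⟨hm, hg⟩
              rcases List.mem_append.1 hm with h | h
              · exact ⟨h, hg⟩
              · exact absurd (by simpa using h) (by simpa using heq)
            · rintro ⟨hm, hg⟩
              exact ⟨List.mem_append.2 (Or.inl hm), hg⟩
          rw [if_congr hmem rfl rfl]
    · rw [initF, if_neg hP]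
      refine ⟨ihS, ?_⟩
      intro r c hr hc
      rw [ihV r c hr hc]
      have hmem : ((r, c) ∈ l ++ [p] ∧ get2 grid r c = 1) ↔
          ((r, c) ∈ l ∧ get2 grid r c = 1) := by
        constructor
        · rintro ⟨hm, hg⟩
          rcases List.mem_append.1 hm with h | h
          · exact ⟨h, hg⟩
          · have hrc : r = p.1 ∧ c = p.2 := by
              have h' : (r, c) = p := by simpa using h
              rw [Prod.ext_iff] at h'
              exact ⟨h'.1, h'.2⟩
            rw [hrc.1, hrc.2] at hg
            exact absurd hg hP
        · rintro ⟨hm, hg⟩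
          exact ⟨List.mem_append.2 (Or.inl hm), hg⟩
      rw [if_congr hmem rfl rfl]

theorem dist0_shape (n : Int) : ShapeN n.toNat (dist0Of n) := by
  constructor
  · simp [dist0Of, PySem.List.length_pyRange_one]
  · intro row hrow
    simp only [dist0Of, List.mem_map] at hrow
    obtain ⟨_, _, rfl⟩ := hrow
    simp

theorem dist0_get2 (n : Int) (r c : Int) (h1 : 0 ≤ r) (h2 : r < n) (h3 : 0 ≤ c) (h4 : c < n) :
    get2 (dist0Of n) r c = -1 := by
  have hs := dist0_shape n
  have hr' : r.toNat < (dist0Of n).length := by rw [hs.1]; omega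
  have hrow : (dist0Of n)[r.toNat] = List.replicate n.toNat (-1 : Int) := by
    simp [dist0Of]
  have hc' : c.toNat < ((dist0Of n)[r.toNat]).length := by
    rw [hrow]; simp; omega
  rw [get2_eq_getElem _ _ _ hr' hc']
  simp [hrow]

theorem thievesOf_eq_filter (grid : List (List Int)) (n : Int) :
    thievesOf grid n = (allCells n).filter (fun p => decide (get2 grid p.1 p.2 = 1)) := by
  rw [thievesOf, allCells, List.filter_flatMap]
  congr 1
  funext r
  rw [List.filter_map]
  rfl

theorem init_inv (grid : List (List Int)) (n : Int) :
    BfsInv grid n ((allCells n).foldl (initF grid) (dist0Of n, [])).1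
      ((allCells n).foldl (initF grid) (dist0Of n, [])).2 := by
  have hcells : ∀ p ∈ allCells n, 0 ≤ p.1 ∧ p.1 < n ∧ 0 ≤ p.2 ∧ p.2 < n :=
    fun p hp => (mem_allCells n p).1 hp
  obtain ⟨hS, hV⟩ := initF_fst grid n (dist0Of n, []) (dist0_shape n) (allCells n) hcells
  have hQ : ((allCells n).foldl (initF grid) (dist0Of n, [])).2 = thievesOf grid n := by
    rw [initF_snd, thievesOf_eq_filter]
    rfl
  have hviz : ∀ r c : Int, 0 ≤ r → r < n → 0 ≤ c → c < n →
      get2 ((allCells n).foldl (initF grid) (dist0Of n, [])).1 r c =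
        if get2 grid r c = 1 then 0 else -1 := by
    intro r c h1 h2 h3 h4
    rw [hV r c h1 h3]
    by_cases hg : get2 grid r c = 1
    · rw [if_pos ⟨(mem_allCells n (r, c)).2 ⟨h1, h2, h3, h4⟩, hg⟩, if_pos hg]
    · rw [if_neg (fun h => hg h.2), if_neg hg]
      exact dist0_get2 n r c h1 h2 h3 h4
  have hmemT : ∀ r c : Int, (r, c) ∈ thievesOf grid n ↔
      0 ≤ r ∧ r < n ∧ 0 ≤ c ∧ c < n ∧ get2 grid r c = 1 :=
    fun r c => mem_thievesOf grid n (r, c)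
  constructor
  · exact hS
  · intro r c h1 h2 h3 h4
    rw [hviz r c h1 h2 h3 h4]
    by_cases hg : get2 grid r c = 1
    · rw [if_pos hg]
      right
      exact (mdOf_mem_zero _ r c ((hmemT r c).2 ⟨h1, h2, h3, h4, hg⟩)).symm
    · rw [if_neg hg]
      left
      rfl
  · intro t ht
    obtain ⟨h1, h2, h3, h4, h5⟩ := (mem_thievesOf grid n t).1 ht
    rw [hviz t.1 t.2 h1 h2 h3 h4, if_pos h5]
    omega
  · intro p hp
    rw [hQ] at hp
    exact thievesOf_range grid n p hp
  · intro p hp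
    rw [hQ] at hp
    obtain ⟨h1, h2, h3, h4, h5⟩ := (mem_thievesOf grid n p).1 hp
    rw [hviz p.1 p.2 h1 h2 h3 h4, if_pos h5]
    omega
  · intro p hp
    rw [hQ] at hp
    obtain ⟨h1, h2, h3, h4, h5⟩ := (mem_thievesOf grid n p).1 hp
    rw [hviz p.1 p.2 h1 h2 h3 h4, if_pos h5]
    exact (mdOf_mem_zero _ p.1 p.2 (by simpa using hp)).symm
  · rw [hQ]
    exact pairwise_const_le _ _ 0 (fun p hp => mdOf_mem_zero _ p.1 p.2 (by simpa using hp))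
  · intro h hh p hp
    rw [hQ] at hh hp
    rw [mdOf_mem_zero _ p.1 p.2 (by simpa using hp),
      mdOf_mem_zero _ h.1 h.2 (by simpa using List.mem_of_mem_head? hh)]
    omega
  · intro h hh r c h1 h2 h3 h4 hx
    rw [hQ] at hh
    have hhT : h ∈ thievesOf grid n := List.mem_of_mem_head? hh
    have hT : thievesOf grid n ≠ [] := List.ne_nil_of_mem hhT
    rw [mdOf_mem_zero _ h.1 h.2 (by simpa using hhT)]
    rw [hviz r c h1 h2 h3 h4] at hx
    have hg : get2 grid r c ≠ 1 := by
      intro hg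
      rw [if_pos hg] at hx
      omega
    have hnm : (r, c) ∉ thievesOf grid n := fun hm => hg ((hmemT r c).1 hm).2.2.2.2
    have h0 : mdOf (thievesOf grid n) r c ≠ 0 := fun h0 => hnm (mdOf_zero_mem _ r c hT h0)
    have := mdOf_nonneg (thievesOf grid n) r c hT
    omega
  · intro r c h1 h2 h3 h4 hvis hnotin d hd k1 k2 k3 k4
    exfalso
    apply hnotin
    rw [hviz r c h1 h2 h3 h4] at hvis
    have hg : get2 grid r c = 1 := by
      by_contra hg
      rw [if_neg hg] at hvis
      exact hvis rfl
    rw [hQ]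
    exact (hmemT r c).2 ⟨h1, h2, h3, h4, hg⟩


theorem main_equiv (grid : List (List Int)) (n : Int) :
    compute_thief_distances_py grid n = compute_thief_distances_py_alt grid n := by
  unfold compute_thief_distances_py compute_thief_distances_py_alt
  simp only []
  rw [show ((PySem.List.pyRange 0 n 1).map
      (fun _ => List.replicate n.toNat (-1 : Int))) = dist0Of n from rfl]
  rw [init_eq_allCells grid n]
  set I := (allCells n).foldl (initF grid) (dist0Of n, ([] : List (Int × Int))) with hI
  have hbound : 2 * cntU n.toNat I.1 + I.2.length ≤
      2 * n.toNat * n.toNat + I.2.length := by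
    have h := cntU_le n.toNat I.1
    have h2 : 2 * cntU n.toNat I.1 ≤ 2 * n.toNat * n.toNat := by
      rw [Nat.mul_assoc]
      exact Nat.mul_le_mul_left 2 h
    omega
  obtain ⟨hS, hV⟩ := bfsLoop_done grid n (2 * n.toNat * n.toNat + I.2.length) I.1 I.2
    (init_inv grid n) hbound
  set R := bfsLoop n (2 * n.toNat * n.toNat + I.2.length) I.1 I.2 with hR
  have hlenR : R.length = n.toNat := hS.1
  apply List.ext_getElem
  · rw [hlenR]
    simp [PySem.List.length_pyRange_one]
  · intro i h1 h2
    have hiN : i < n.toNat := by rwa [hlenR] at h1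
    have hrowlen : R[i].length = n.toNat := hS.2 _ (List.getElem_mem h1)
    rw [List.getElem_map]
    apply List.ext_getElem
    · rw [hrowlen]
      simp [PySem.List.length_pyRange_one]
    · intro j g1 g2
      have hjN : j < n.toNat := by rwa [hrowlen] at g1
      simp only [List.getElem_map, PySem.List.getElem_pyRange_one]
      have e := get2_natCast R i j h1 (by rw [hrowlen]; exact hjN)
      rw [← e, hV (i : Int) (j : Int) (by positivity) (by omega) (by positivity) (by omega)]
      simp

-- ===== VERDICT (by name: the statement is the Claim_ definition above) =====
theorem compute_thief_distances_py_spec : Claim_equal_compute_thief_distances_py := by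
  intro grid n _ _
  exact main_equiv grid n
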